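-- pv_equiv track=rewrite | github.com/louis2038/rummikub | rumicube.py | transformInTable
-- ===== SOURCE A (Python) =====
-- def transformInTable(number):
-- 	if(number == 105):
-- 		lignes = 1
-- 		colonnes = 8
-- 	if(number == 106):
-- 		lignes = 2
-- 		colonnes = 8
-- 	if(number < 105):
-- 		lignes = number
-- 		colonnes = 0
--
-- 		while(lignes > 13):
-- 			lignes = lignes - 13
-- 			colonnes = colonnes + 1
--
-- 	lignes = lignes - 1
-- 	return[lignes,colonnes]
-- ===== SOURCE B (Python) =====
-- def transformInTable(number):
-- 	if(number == 105):
-- 		lignes = 1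
-- 		colonnes = 8
-- 	if(number == 106):
-- 		lignes = 2
-- 		colonnes = 8
-- 	if(number < 105):
-- 		if number > 13:
-- 			colonnes, lignes = divmod(number - 1, 13)
-- 			return [lignes, colonnes]
-- 		lignes = number
-- 		colonnes = 0
-- 	return [lignes - 1, colonnes]
-- ===== Notes on version B (the rewrite author's own statement) =====
-- stated objective: idiomatic
-- what changed: The repeated-subtraction while loop is replaced by a closed-form divmod(number-1, 13) computation; the three special-case branches are kept.
import Mathlib
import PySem

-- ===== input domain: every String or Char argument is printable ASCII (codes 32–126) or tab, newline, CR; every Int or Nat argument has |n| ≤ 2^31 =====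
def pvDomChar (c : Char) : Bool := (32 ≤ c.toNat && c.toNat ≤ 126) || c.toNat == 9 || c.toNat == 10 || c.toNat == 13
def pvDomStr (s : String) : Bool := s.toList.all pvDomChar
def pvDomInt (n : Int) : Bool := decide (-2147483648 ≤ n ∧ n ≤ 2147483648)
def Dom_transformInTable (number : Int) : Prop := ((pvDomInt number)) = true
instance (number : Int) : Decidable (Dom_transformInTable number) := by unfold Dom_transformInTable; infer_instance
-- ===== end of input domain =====

-- B replaces A's repeated-subtraction while loop with a closed-form divmod(number-1, 13); same branch structure otherwise (idiomatic).


-- ===== PORT A =====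
-- the while loop: subtract 13 from lignes, add 1 to colonnes, while lignes > 13
def pvLoopA (lignes colonnes : Int) : Int × Int :=
  if h : lignes > 13 then pvLoopA (lignes - 13) (colonnes + 1) else (lignes, colonnes)
termination_by lignes.toNat
decreasing_by omega

def transformInTable (number : Int) : List Int :=
  if number = 105 then [1 - 1, 8]
  else if number = 106 then [2 - 1, 8]
  else if number < 105 then
    let p := pvLoopA number 0
    [p.1 - 1, p.2]
  else []  -- unreachable under Pre_: Python raises UnboundLocalError here

-- ===== PORT B =====
def transformInTable_alt (number : Int) : List Int :=
  if number = 105 then [1 - 1, 8]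
  else if number = 106 then [2 - 1, 8]
  else if number < 105 then
    if number > 13 then
      [PySem.Int.mod (number - 1) 13, PySem.Int.floordiv (number - 1) 13]
    else [number - 1, 0]
  else []  -- unreachable under Pre_: Python raises UnboundLocalError here

-- ===== PRECONDITION & SPEC =====
-- Pre_ excludes number ≥ 107, where A (and B) raise UnboundLocalError: no branch assigns lignes/colonnes.
def Pre_transformInTable (number : Int) : Prop := number ≤ 106
instance (number : Int) : Decidable (Pre_transformInTable number) := by unfold Pre_transformInTable; infer_instance
def pvWitness_transformInTable : Int := (40)

def Spec_transformInTable (number : Int) (out : List Int) : Prop := out = transformInTable_alt number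
instance (number : Int) (out : List Int) : Decidable (Spec_transformInTable number out) := by unfold Spec_transformInTable; infer_instance

-- ===== CLAIM (what is proved, stated in full; the proofs are below) =====
def Claim_equal_transformInTable : Prop := ∀ (number : Int), Dom_transformInTable number → Pre_transformInTable number → Spec_transformInTable number (transformInTable number)

-- ===== LEMMAS AND PROOFS =====
theorem pvLoopA_closed (n : Nat) : ∀ (l c : Int), l.toNat = n → 13 < l →
    pvLoopA l c = ((l - 1) % 13 + 1, c + (l - 1) / 13) := by
  induction n using Nat.strong_induction_on with
  | _ n ih =>
    intro l c hn hl
    rw [pvLoopA, dif_pos hl]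
    by_cases h2 : 13 < l - 13
    · rw [ih (l - 13).toNat (by omega) _ _ rfl h2]
      rw [Prod.mk.injEq]
      refine ⟨by omega, ?_⟩
      have h13 : l - 13 - 1 = (l - 1) + (-1) * 13 := by ring
      rw [h13, Int.add_mul_ediv_right _ _ (by norm_num : (13:Int) ≠ 0)]
      ring
  -- base: l - 13 ≤ 13, so 0 < l - 13 ≤ 13 gives (l-1)/13 = 1, (l-1)%13 = l-14
    · rw [pvLoopA, dif_neg h2]
      have hdiv : (l - 1) / 13 = 1 := by omega
      have hmod : (l - 1) % 13 = l - 14 := by omega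
      rw [hdiv, hmod, Prod.mk.injEq]
      constructor <;> omega

-- ===== VERDICT (by name: the statement is the Claim_ definition above) =====
theorem transformInTable_spec : Claim_equal_transformInTable := by
  intro number _ hpre
  unfold Spec_transformInTable transformInTable transformInTable_alt
  by_cases h1 : number = 105
  · simp [h1]
  by_cases h2 : number = 106
  · simp [h2]
  by_cases h3 : number < 105
  · simp only [if_neg h1, if_neg h2, if_pos h3]
    by_cases h4 : number > 13
    · rw [pvLoopA_closed number.toNat number 0 rfl h4]
      rw [PySem.Int.mod_eq_emod_of_pos (by norm_num), PySem.Int.floordiv_eq_ediv_of_pos (by norm_num)]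
      simp
      omega
    · rw [if_neg h4, pvLoopA, dif_neg h4]
  · exfalso; unfold Pre_transformInTable at hpre; omega
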